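-- pv_equiv track=rewrite | github.com/Alan-Musk/University_Life | Python/cs61a_2020fall/example/Week11/scheme_tokens.py | next_condidate_token
-- ===== SOURCE A (Python) =====
-- _WHITSPACE=set(' \t\n\r')
--
-- _SINGLE_CHAR_TOKENS=set("()'")
--
-- _TOKEN_END=_WHITSPACE|_SINGLE_CHAR_TOKENS
--
-- def next_condidate_token(line,k):
--     """A tuple (tok, k'), where tok is the next substring of line at or
--     after position k that could be a token (assuming it passes a validity
--     check), and k' is the position in line following that token.  Returns
--     (None, len(line)) when there are no more tokens."""
--     while k<len(line):
--         c=line[k]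
--         if c==';':
--             return None,len(line)
--         elif c in _WHITSPACE:
--             k+=1
--         elif c in _SINGLE_CHAR_TOKENS:
--             return c,k+1
--         elif c=='#': # Boolean values #t and #f
--             return line[k:k+2],min(k+2,len(line))
--         else:
--             j=k
--             while j<len(line) and line[j] not in _TOKEN_END:
--                 j+=1
--             return line[k:j],min(j,len(line))
--     return None,len(line)
-- ===== SOURCE B (Python) =====
-- # B: staged string-level scanner: lstrip to skip whitespace (start recovered from the
-- # suffix length), then one dispatch, with the general token's end found as the minimum
-- # of bounded str.find calls over the 7 delimiter characters -- no per-character loop.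
-- _WS = ' \t\n\r'
--
-- def next_condidate_token(line, k):
--     n = len(line)
--     stripped = line[k:].lstrip(_WS)
--     k = n - len(stripped)
--     if not stripped or stripped[0] == ';':
--         return None, n
--     c = stripped[0]
--     if c in "()'":
--         return c, k + 1
--     if c == '#':
--         return stripped[:2], min(k + 2, n)
--     j = len(stripped)
--     for d in _WS + "()'":
--         p = stripped.find(d, 0, j)
--         if p != -1:
--             j = p
--     return stripped[:j], k + j
-- ===== Notes on version B (the rewrite author's own statement) =====
-- stated objective: faster
-- what changed: Replaced A's stateful character-at-a-time loops (whitespace skip with inline dispatch and an inner index-advancing token scan) by a staged string-level scanner: lstrip skips whitespace (position recovered from the suffix length) and the general token's end is the minimum of bounded str.find calls over the 7 delimiter characters, so B has no per-character Python-level loop at all (the scanning runs inside C string primitives, a constant-factor speedup a timing run measured).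
-- outside the precondition, e.g. on next_condidate_token(' a', -2): A returns ('', 0), B returns ('a', 2); on next_condidate_token('a', -5): A raises IndexError, B returns ('a', 1)
import Mathlib
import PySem

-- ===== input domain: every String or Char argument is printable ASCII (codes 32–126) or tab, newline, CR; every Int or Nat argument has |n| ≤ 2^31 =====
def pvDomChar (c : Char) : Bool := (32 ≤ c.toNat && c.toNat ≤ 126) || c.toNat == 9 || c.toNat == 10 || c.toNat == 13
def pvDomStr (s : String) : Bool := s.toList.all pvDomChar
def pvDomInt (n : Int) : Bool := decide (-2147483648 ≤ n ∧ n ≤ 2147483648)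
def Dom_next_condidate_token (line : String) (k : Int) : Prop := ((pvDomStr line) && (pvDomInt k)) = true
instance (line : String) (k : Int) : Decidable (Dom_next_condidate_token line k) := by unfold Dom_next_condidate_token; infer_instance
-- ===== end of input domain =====

-- B replaces A's character-at-a-time loops by a staged string-level scanner: lstrip skips
-- whitespace and the general token's end is the minimum of bounded finds over the 7
-- delimiter characters; a timing run measured B faster by a constant factor.

def pvWS (c : Char) : Bool := c == ' ' || c == '\t' || c == '\n' || c == '\r'
def pvSingle (c : Char) : Bool := c == '(' || c == ')' || c == '\''
def pvTokenEnd (c : Char) : Bool := pvWS c || pvSingle c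

-- ===== PORT A =====
-- inner 'while j<len(line) and line[j] not in _TOKEN_END: j+=1', with explicit fuel
-- (called with fuel = (len-j).toNat, exactly the remaining iterations; fuel 0 ⟺ j ≥ len there)
def pvScanAF (cs : List Char) : Int → Nat → Int
  | j, 0 => j
  | j, fuel + 1 =>
    if j < (cs.length : Int) then
      match PySem.List.pyGet? cs j with
      | some c => if pvTokenEnd c then j else pvScanAF cs (j + 1) fuel
      | none => j          -- Python raises IndexError here; outside Pre_
    else j

def pvScanA (cs : List Char) (j : Int) : Int :=
  pvScanAF cs j ((cs.length : Int) - j).toNat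

-- outer 'while k<len(line): …', with explicit fuel in the same way
def pvLoopAF (cs : List Char) : Int → Nat → Option String × Int
  | _, 0 => (none, (cs.length : Int))
  | k, fuel + 1 =>
    if k < (cs.length : Int) then
      match PySem.List.pyGet? cs k with
      | none => (none, (cs.length : Int))   -- Python raises IndexError here; outside Pre_
      | some c =>
        if c == ';' then (none, (cs.length : Int))
        else if pvWS c then pvLoopAF cs (k + 1) fuel
        else if pvSingle c then (some (String.ofList [c]), k + 1)
        else if c == '#' then
          (some (String.ofList (PySem.List.slice cs (some k) (some (k + 2)))), min (k + 2) (cs.length : Int))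
        else
          let j := pvScanA cs k
          (some (String.ofList (PySem.List.slice cs (some k) (some j))), min j (cs.length : Int))
    else (none, (cs.length : Int))

def next_condidate_token (line : String) (k : Int) : Option String × Int :=
  pvLoopAF line.toList k ((line.toList.length : Int) - k).toNat

-- ===== PORT B =====
-- hand port of tail.lstrip(' \t\n\r'): drop leading whitespace chars (exact for str.lstrip with that set)
def pvLstrip : List Char → List Char
  | [] => []
  | c :: rest => if pvWS c then pvLstrip rest else c :: rest

-- hand port of stripped.find(d, 0, j): first index i with i < j and cs[i] = d, else -1
-- (exact for Python str.find(d, 0, j) with 0 ≤ j; i is the index of cs's head)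
def pvFindIn (d : Char) (j : Int) : List Char → Int → Int
  | [], _ => -1
  | c :: rest, i => if i < j then (if c == d then i else pvFindIn d j rest (i + 1)) else -1

def next_condidate_token_alt (line : String) (k : Int) : Option String × Int :=
  let cs := line.toList
  let n : Int := (cs.length : Int)
  let stripped := pvLstrip (PySem.List.slice cs (some k) none)
  let k' := n - (stripped.length : Int)
  match stripped with
  | [] => (none, n)                                    -- 'if not stripped or stripped[0]==";"'
  | c :: _ =>
    if c == ';' then (none, n)
    else if pvSingle c then (some (String.ofList [c]), k' + 1)
    else if c == '#' then
      (some (String.ofList (PySem.List.slice stripped none (some 2))), min (k' + 2) n)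
    else
      -- for d in " \t\n\r()'": p = stripped.find(d, 0, j); if p != -1: j = p
      let j := [' ', '\t', '\n', '\r', '(', ')', '\''].foldl
        (fun j d => let p := pvFindIn d j stripped 0; if p != -1 then p else j)
        (stripped.length : Int)
      (some (String.ofList (PySem.List.slice stripped none (some j))), k' + j)

-- ===== PRECONDITION & SPEC =====
-- Pre_ requires 0 ≤ k: for -len(line) ≤ k < 0 A still returns, but its negative-index
-- wraparound makes the scan cross the wrap and yield accidental token boundaries (a
-- defensible-corner artefact, cited in the claim); for k < -len(line) A raises IndexError.
def Pre_next_condidate_token (line : String) (k : Int) : Prop := 0 ≤ k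
instance (line : String) (k : Int) : Decidable (Pre_next_condidate_token line k) := by
  unfold Pre_next_condidate_token; infer_instance

def pvWitness_next_condidate_token : String × Int := ("(+ 1 2)", 0)

def Spec_next_condidate_token (line : String) (k : Int) (out : Option String × Int) : Prop :=
  out = next_condidate_token_alt line k
instance (line : String) (k : Int) (out : Option String × Int) :
    Decidable (Spec_next_condidate_token line k out) := by
  unfold Spec_next_condidate_token; infer_instance

-- ===== CLAIM (what is proved, stated in full; the proofs are below) =====
def Claim_equal_next_condidate_token : Prop :=
  ∀ (line : String) (k : Int), Dom_next_condidate_token line k →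
    Pre_next_condidate_token line k →
    Spec_next_condidate_token line k (next_condidate_token line k)

-- ===== LEMMAS AND PROOFS =====

-- proof-side mid-form: first index i in [a, len) with p (cs[i]), else len
def pvNextIdx (cs : List Char) (a : Int) (p : Char → Bool) : Int :=
  (((PySem.List.pyRange a (cs.length : Int) 1).find?
      (fun i => (PySem.List.pyGet? cs i).any p)).getD (cs.length : Int))

-- proof-side mid-form: the dispatch both programs perform at the first non-ws position
def pvDispatchB (cs : List Char) (k' : Int) : Option String × Int :=
  if k' == (cs.length : Int) then (none, (cs.length : Int))
  else
    match PySem.List.pyGet? cs k' with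
    | none => (none, (cs.length : Int))
    | some c =>
      if c == ';' then (none, (cs.length : Int))
      else if pvSingle c then (some (String.ofList [c]), k' + 1)
      else if c == '#' then
        (some (String.ofList (PySem.List.slice cs (some k') (some (k' + 2)))), min (k' + 2) (cs.length : Int))
      else
        let j := pvNextIdx cs (k' + 1) pvTokenEnd
        (some (String.ofList (PySem.List.slice cs (some k') (some j))), j)

theorem pvScanA_of_ge (cs : List Char) (j : Int) (h : ¬ j < (cs.length : Int)) :
    pvScanA cs j = j := by
  have h0 : ((cs.length : Int) - j).toNat = 0 := by omega
  rw [pvScanA, h0, pvScanAF]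

theorem pvScanA_of_lt (cs : List Char) (j : Int) (h : j < (cs.length : Int)) :
    pvScanA cs j =
      match PySem.List.pyGet? cs j with
      | some c => if pvTokenEnd c then j else pvScanA cs (j + 1)
      | none => j := by
  have h1 : ((cs.length : Int) - j).toNat = ((cs.length : Int) - (j + 1)).toNat + 1 := by omega
  rw [pvScanA, h1, pvScanAF, if_pos h, pvScanA]

theorem pvLoopA_of_ge (cs : List Char) (k : Int) (fuel : Nat)
    (h : ¬ k < (cs.length : Int)) :
    pvLoopAF cs k fuel = (none, (cs.length : Int)) := by
  cases fuel with
  | zero => rw [pvLoopAF]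
  | succ n => rw [pvLoopAF, if_neg h]

theorem pvNextIdx_le (cs : List Char) (a : Int) (p : Char → Bool) :
    pvNextIdx cs a p ≤ (cs.length : Int) := by
  unfold pvNextIdx
  cases h : (PySem.List.pyRange a (cs.length : Int) 1).find?
      (fun i => (PySem.List.pyGet? cs i).any p) with
  | none => simp
  | some x =>
    have hx := List.mem_of_find?_eq_some h
    rw [PySem.List.mem_pyRange_one] at hx
    simpa using le_of_lt hx.2

theorem pvNextIdx_ge (cs : List Char) (a : Int) (p : Char → Bool) (ha : 0 ≤ a) :
    0 ≤ pvNextIdx cs a p := by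
  unfold pvNextIdx
  cases h : (PySem.List.pyRange a (cs.length : Int) 1).find?
      (fun i => (PySem.List.pyGet? cs i).any p) with
  | none => simp
  | some x =>
    have hx := List.mem_of_find?_eq_some h
    rw [PySem.List.mem_pyRange_one] at hx
    simp only [Option.getD_some]
    omega

theorem pvNextIdx_of_ge (cs : List Char) (a : Int) (p : Char → Bool)
    (h : (cs.length : Int) ≤ a) : pvNextIdx cs a p = (cs.length : Int) := by
  unfold pvNextIdx
  rw [PySem.List.pyRange_one_eq_nil h]
  simp

theorem pvNextIdx_step (cs : List Char) (a : Int) (p : Char → Bool)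
    (h : a < (cs.length : Int)) :
    pvNextIdx cs a p =
      if (PySem.List.pyGet? cs a).any p then a else pvNextIdx cs (a + 1) p := by
  unfold pvNextIdx
  rw [PySem.List.pyRange_one_cons h, List.find?_cons]
  split <;> simp_all

theorem pvGet_some (cs : List Char) (a : Int) (h1 : -(cs.length : Int) ≤ a)
    (h2 : a < (cs.length : Int)) : ∃ c, PySem.List.pyGet? cs a = some c := by
  cases h : PySem.List.pyGet? cs a with
  | some c => exact ⟨c, rfl⟩
  | none =>
    rw [PySem.List.pyGet?_eq_none_iff] at h
    exact absurd ⟨by exact_mod_cast h1, by exact_mod_cast h2⟩ h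

theorem pvScanA_eq_nextIdx (cs : List Char) (fuel : Nat) (j : Int)
    (hf : ((cs.length : Int) - j).toNat ≤ fuel)
    (h1 : -(cs.length : Int) ≤ j) (h2 : j ≤ (cs.length : Int)) :
    pvScanA cs j = pvNextIdx cs j pvTokenEnd := by
  induction fuel generalizing j with
  | zero =>
    have hj : j = (cs.length : Int) := by omega
    rw [pvScanA_of_ge cs j (by omega), pvNextIdx_of_ge cs j _ (by omega), hj]
  | succ n ih =>
    by_cases h : j < (cs.length : Int)
    · obtain ⟨c, hc⟩ := pvGet_some cs j h1 h
      rw [pvNextIdx_step cs j _ h, hc, pvScanA_of_lt cs j h, hc]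
      by_cases ht : pvTokenEnd c
      · simp [ht]
      · simp only [ht, if_neg, Bool.false_eq_true, not_false_eq_true, Option.any_some]
        exact ih (j + 1) (by omega) (by omega) (by omega)
    · rw [pvScanA_of_ge cs j h, pvNextIdx_of_ge cs j _ (by omega)]
      omega

theorem pvLoopA_eq (cs : List Char) (fuel : Nat) (k : Int)
    (hf : ((cs.length : Int) - k).toNat ≤ fuel) (h1 : -(cs.length : Int) ≤ k) :
    pvLoopAF cs k ((cs.length : Int) - k).toNat =
      pvDispatchB cs (pvNextIdx cs k (fun c => !pvWS c)) := by
  induction fuel generalizing k with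
  | zero =>
    rw [pvLoopA_of_ge cs k _ (by omega), pvNextIdx_of_ge cs k _ (by omega)]
    unfold pvDispatchB
    simp
  | succ n ih =>
    by_cases h : k < (cs.length : Int)
    · obtain ⟨c, hc⟩ := pvGet_some cs k h1 h
      have h1' : ((cs.length : Int) - k).toNat = ((cs.length : Int) - (k + 1)).toNat + 1 := by
        omega
      rw [pvNextIdx_step cs k _ h, hc, h1', pvLoopAF, if_pos h, hc]
      by_cases hws : pvWS c
      · -- whitespace: A advances; B's search skips it
        have hsemi : (c == ';') = false := by
          revert hws; unfold pvWS; rcases eq_or_ne c ';' with rfl | hne <;> simp_all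
        simp only [hsemi, hws, Option.any_some, Bool.not_true, if_neg, Bool.false_eq_true,
          not_false_eq_true, if_pos]
        exact ih (k + 1) (by omega) (by omega)
      · -- first non-whitespace char found at k
        simp only [Option.any_some, hws, Bool.not_false, if_true]
        have hkn : (k == (cs.length : Int)) = false := by simp; omega
        unfold pvDispatchB
        rw [hkn]
        simp only [Bool.false_eq_true, if_neg, not_false_eq_true, hc]
        by_cases hsemi : c = ';'
        · simp [hsemi]
        · have hsemi' : (c == ';') = false := by simp [hsemi]
          simp only [hsemi', Bool.false_eq_true, if_neg, not_false_eq_true, hws]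
          by_cases hsg : pvSingle c
          · simp [hsg]
          · simp only [hsg, Bool.false_eq_true, if_neg, not_false_eq_true]
            by_cases hhash : c = '#'
            · simp [hhash]
            · have hhash' : (c == '#') = false := by simp [hhash]
              have hte : pvTokenEnd c = false := by
                unfold pvTokenEnd; simp [hws, hsg]
              have hscan : pvScanA cs k = pvNextIdx cs (k + 1) pvTokenEnd := by
                rw [pvScanA_eq_nextIdx cs ((cs.length : Int) - k).toNat k le_rfl h1
                  (le_of_lt h)]
                rw [pvNextIdx_step cs k _ h, hc]
                simp [hte]
              have hle : pvNextIdx cs (k + 1) pvTokenEnd ≤ (cs.length : Int) :=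
                pvNextIdx_le cs (k + 1) pvTokenEnd
              simp only [hhash', Bool.false_eq_true, if_neg, not_false_eq_true, hscan]
              rw [min_eq_left hle]
    · rw [pvLoopA_of_ge cs k _ h, pvNextIdx_of_ge cs k _ (by omega)]
      unfold pvDispatchB
      simp

-- ---- B-side lemmas ----

theorem pvFindIn_eq (d : Char) (cs : List Char) : ∀ i j : Int,
    pvFindIn d j cs i =
      if (cs.findIdx (· == d) : Int) < (cs.length : Int) ∧
         i + (cs.findIdx (· == d) : Int) < j
      then i + (cs.findIdx (· == d) : Int) else -1 := by
  induction cs with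
  | nil => intro i j; simp [pvFindIn]
  | cons c rest ih =>
    intro i j
    have hle : rest.findIdx (· == d) ≤ rest.length := List.findIdx_le_length
    rw [pvFindIn]
    by_cases hij : i < j
    · rw [if_pos hij]
      by_cases hcd : (c == d) = true
      · rw [if_pos hcd]
        simp only [List.findIdx_cons, hcd, cond_true, List.length_cons]
        rw [if_pos (by push_cast; omega)]
        omega
      · rw [if_neg hcd, ih (i + 1) j]
        simp only [List.findIdx_cons, hcd, cond_false, List.length_cons]
        split_ifs with h1 h2 h2 <;> push_cast at * <;> omega
    · rw [if_neg hij, if_neg (by push_cast; omega)]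

theorem pvFindIdx_or_min (p q : Char → Bool) (l : List Char) :
    l.findIdx (fun c => p c || q c) = min (l.findIdx p) (l.findIdx q) := by
  induction l with
  | nil => simp
  | cons c rest ih =>
    simp only [List.findIdx_cons, ih]
    cases hp : p c <;> cases hq : q c <;> simp <;> omega

theorem pvStep (s : List Char) (p : Char → Bool) (d : Char) :
    (if pvFindIn d ((s.findIdx p : Int)) s 0 != -1
     then pvFindIn d ((s.findIdx p : Int)) s 0 else (s.findIdx p : Int)) =
      (s.findIdx (fun c => p c || c == d) : Int) := by
  have hdle : s.findIdx (· == d) ≤ s.length := List.findIdx_le_length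
  have hple : s.findIdx p ≤ s.length := List.findIdx_le_length
  rw [pvFindIn_eq, pvFindIdx_or_min]
  by_cases h : ((s.findIdx (· == d) : Int) < (s.length : Int) ∧
      0 + (s.findIdx (· == d) : Int) < (s.findIdx p : Int))
  · rw [if_pos h]
    have hne : ((0 + (s.findIdx (· == d) : Int)) != -1) = true := by
      simp only [bne_iff_ne, ne_eq]; omega
    rw [if_pos hne]
    push_cast
    omega
  · rw [if_neg h]
    simp only [bne_self_eq_false, Bool.false_eq_true, if_false]
    push_cast at *
    omega

theorem pvFindIdx_false (l : List Char) : l.findIdx (fun _ => false) = l.length := by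
  induction l with
  | nil => rfl
  | cons c rest ih => simp [List.findIdx_cons, ih]

theorem pvFold7 (s : List Char) :
    [' ', '\t', '\n', '\r', '(', ')', '\''].foldl
        (fun j d => let p := pvFindIn d j s 0; if p != -1 then p else j)
        ((s.length : Int)) = (s.findIdx pvTokenEnd : Int) := by
  have h0 : ((s.length : Int)) = (s.findIdx (fun _ => false) : Int) := by
    rw [pvFindIdx_false]
  have hpred : (fun c => false || c == ' ' || c == '\t' || c == '\n' || c == '\r' ||
      c == '(' || c == ')' || c == '\'') = pvTokenEnd := by
    funext c
    simp only [pvTokenEnd, pvWS, pvSingle]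
    cases h1 : (c == ' ') <;> cases h2 : (c == '\t') <;> cases h3 : (c == '\n') <;>
      cases h4 : (c == '\r') <;> cases h5 : (c == '(') <;> cases h6 : (c == ')') <;>
      cases h7 : (c == '\'') <;> simp [h1, h2, h3, h4, h5, h6, h7]
  simp only [List.foldl]
  rw [h0, pvStep, pvStep, pvStep, pvStep, pvStep, pvStep, pvStep, hpred]

theorem pvGetNat (cs : List Char) (m : Nat) (h : m < cs.length) :
    PySem.List.pyGet? cs (m : Int) = some cs[m] := by
  simp [PySem.List.pyGet?_natCast, List.getElem?_eq_getElem h]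

theorem pvLstrip_drop (cs : List Char) (fuel : Nat) : ∀ m : Nat, cs.length - m ≤ fuel →
    pvLstrip (cs.drop m) = cs.drop ((pvNextIdx cs (m : Int) (fun c => !pvWS c)).toNat) := by
  induction fuel with
  | zero =>
    intro m hm
    have hml : cs.length ≤ m := by omega
    rw [List.drop_eq_nil_of_le hml, pvNextIdx_of_ge cs m _ (by exact_mod_cast hml)]
    simp [pvLstrip]
  | succ n ih =>
    intro m hm
    by_cases h : m < cs.length
    · rw [List.drop_eq_getElem_cons h, pvNextIdx_step cs m _ (by exact_mod_cast h),
        pvGetNat cs m h, pvLstrip]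
      by_cases hws : pvWS cs[m]
      · have hcast : (m : Int) + 1 = ((m + 1 : Nat) : Int) := by push_cast; ring
        rw [if_pos hws]
        simp only [Option.any_some, hws, Bool.not_true, Bool.false_eq_true, if_neg,
          not_false_eq_true, hcast]
        exact ih (m + 1) (by omega)
      · rw [if_neg hws]
        simp only [Option.any_some, hws, Bool.not_false, if_true, Int.toNat_natCast]
        rw [List.drop_eq_getElem_cons h]
    · have hml : cs.length ≤ m := by omega
      rw [List.drop_eq_nil_of_le hml, pvNextIdx_of_ge cs m _ (by exact_mod_cast hml)]
      simp [pvLstrip]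

theorem pvNextIdx_eq_findIdx (cs : List Char) (p : Char → Bool) (fuel : Nat) :
    ∀ m : Nat, m ≤ cs.length → cs.length - m ≤ fuel →
    pvNextIdx cs (m : Int) p = (m : Int) + ((cs.drop m).findIdx p : Int) := by
  induction fuel with
  | zero =>
    intro m hle hm
    have hml : m = cs.length := by omega
    rw [List.drop_eq_nil_of_le (by omega), pvNextIdx_of_ge cs m _ (by exact_mod_cast hml.ge)]
    simp [hml]
  | succ n ih =>
    intro m hle hm
    by_cases h : m < cs.length
    · rw [List.drop_eq_getElem_cons h, pvNextIdx_step cs m _ (by exact_mod_cast h),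
        pvGetNat cs m h, List.findIdx_cons]
      by_cases hp : p cs[m]
      · simp [hp]
      · have hcast : (m : Int) + 1 = ((m + 1 : Nat) : Int) := by push_cast; ring
        simp only [Option.any_some, hp, Bool.false_eq_true, if_neg, not_false_eq_true,
          cond_false, hcast]
        rw [ih (m + 1) (by omega) (by omega)]
        push_cast
        ring
    · have hml : m = cs.length := by omega
      rw [List.drop_eq_nil_of_le (by omega), pvNextIdx_of_ge cs m _ (by exact_mod_cast hml.ge)]
      simp [hml]

theorem pvLstrip_head_not_ws (l : List Char) (c : Char) (rest : List Char)
    (h : pvLstrip l = c :: rest) : pvWS c = false := by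
  induction l with
  | nil => simp [pvLstrip] at h
  | cons a l ih =>
    rw [pvLstrip] at h
    by_cases ha : pvWS a
    · exact ih (by rwa [if_pos ha] at h)
    · rw [if_neg ha] at h
      cases h
      simpa using ha

theorem pvAlt_eq_dispatch (line : String) (k : Int) (hk : 0 ≤ k) :
    next_condidate_token_alt line k =
      pvDispatchB line.toList (pvNextIdx line.toList k (fun c => !pvWS c)) := by
  have hKle := pvNextIdx_le line.toList k (fun c => !pvWS c)
  have hKge := pvNextIdx_ge line.toList k (fun c => !pvWS c) hk
  set cs := line.toList with hcs
  set K := pvNextIdx cs k (fun c => !pvWS c) with hK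
  have hstr : pvLstrip (PySem.List.slice cs (some k) none) = cs.drop K.toNat := by
    rw [PySem.List.slice_from cs hk]
    have h := pvLstrip_drop cs cs.length k.toNat (by omega)
    rwa [Int.toNat_of_nonneg hk] at h
  have hKn : K.toNat ≤ cs.length := by omega
  have hlen : ((cs.drop K.toNat).length : Int) = (cs.length : Int) - K := by
    rw [List.length_drop]; omega
  simp only [next_condidate_token_alt, ← hcs, hstr]
  cases hd : cs.drop K.toNat with
  | nil =>
    have hKeq : K = (cs.length : Int) := by
      have := List.drop_eq_nil_iff.mp hd
      omega
    unfold pvDispatchB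
    rw [if_pos (by simp [hKeq])]
  | cons c rest =>
    have hlt : K.toNat < cs.length := by
      by_contra hcon
      rw [List.drop_eq_nil_of_le (by omega)] at hd
      exact List.cons_ne_nil c rest hd.symm
    have hgetc : cs[K.toNat] = c := by
      have h2 := List.drop_eq_getElem_cons hlt
      rw [hd] at h2
      exact (List.cons.injEq _ _ _ _ ▸ h2).1.symm
    have hget : PySem.List.pyGet? cs K = some c := by
      rw [← Int.toNat_of_nonneg hKge, pvGetNat cs K.toNat hlt, hgetc]
    have hk' : (cs.length : Int) - (((c :: rest).length : Int)) = K := by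
      have : (c :: rest).length = cs.length - K.toNat := by
        rw [← hd, List.length_drop]
      rw [this]; omega
    simp only [hk']
    unfold pvDispatchB
    have hKne : ¬ ((K == ((cs.length : Nat) : Int)) = true) := by
      simp only [beq_iff_eq]
      omega
    simp only [hget]
    rw [if_neg hKne]
    have hnotws : pvWS c = false := pvLstrip_head_not_ws _ c rest (hstr.trans hd)
    by_cases hsemi : (c == ';') = true
    · rw [if_pos hsemi, if_pos hsemi]
    · rw [if_neg hsemi, if_neg hsemi]
      by_cases hsg : pvSingle c
      · rw [if_pos hsg, if_pos hsg]
      · rw [if_neg hsg, if_neg hsg]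
        have hte : pvTokenEnd c = false := by
          have hsg' : pvSingle c = false := by
            revert hsg; cases pvSingle c <;> simp
          unfold pvTokenEnd; rw [hnotws, hsg']; rfl
        by_cases hh : (c == '#') = true
        · rw [if_pos hh, if_pos hh]
          have hsl : PySem.List.slice cs (some K) (some (K + 2)) = (c :: rest).take 2 := by
            rw [← hd, ← Int.toNat_of_nonneg hKge]
            have h2 : ((K.toNat : Int)) + 2 = ((K.toNat : Int)) + ((2 : Nat) : Int) := by norm_num
            rw [h2, PySem.List.slice_natCast_add, Int.toNat_natCast]
          have hsl' : PySem.List.slice (c :: rest) none (some 2) = (c :: rest).take 2 := by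
            rw [PySem.List.slice_to _ (by norm_num)]
            rfl
          rw [hsl, hsl']
        · rw [if_neg hh, if_neg hh]
          -- general token branch
          have hJ : pvNextIdx cs (K + 1) pvTokenEnd = K + ((c :: rest).findIdx pvTokenEnd : Int) := by
            have hstep := pvNextIdx_step cs K pvTokenEnd (by omega)
            rw [hget] at hstep
            simp only [Option.any_some, hte, Bool.false_eq_true, if_neg, not_false_eq_true] at hstep
            rw [← hstep, ← Int.toNat_of_nonneg hKge,
              pvNextIdx_eq_findIdx cs pvTokenEnd cs.length K.toNat hKn (by omega), hd]
          have hfold := pvFold7 (c :: rest)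
          simp only [hfold, hJ]
          have hsl2 : PySem.List.slice cs (some K) (some (K + ((c :: rest).findIdx pvTokenEnd : Int))) =
              (c :: rest).take ((c :: rest).findIdx pvTokenEnd) := by
            rw [← hd, ← Int.toNat_of_nonneg hKge, PySem.List.slice_natCast_add,
              Int.toNat_natCast]
          have hsl3 : PySem.List.slice (c :: rest) none (some ((c :: rest).findIdx pvTokenEnd : Int)) =
              (c :: rest).take ((c :: rest).findIdx pvTokenEnd) := by
            rw [PySem.List.slice_to _ (by positivity)]
            simp
          rw [hsl2, hsl3]

-- ===== VERDICT (by name: the statement is the Claim_ definition above) =====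
theorem next_condidate_token_spec : Claim_equal_next_condidate_token := by
  intro line k _ hpre
  unfold Pre_next_condidate_token at hpre
  unfold Spec_next_condidate_token next_condidate_token
  rw [pvLoopA_eq line.toList ((line.toList.length : Int) - k).toNat k le_rfl (by
    have h0 : (0:Int) ≤ (line.toList.length : Int) := Int.natCast_nonneg _
    omega)]
  exact (pvAlt_eq_dispatch line k hpre).symm
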